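-- pv_equiv track=rewrite | github.com/wshuai190/desksearch | src/desksearch/indexer/chunker.py | _find_split_point
-- ===== SOURCE A (Python) =====
-- def _find_split_point(text: str, max_size: int) -> int:
--     """Find the best split point near max_size, preferring sentence/word boundaries."""
--     if max_size >= len(text):
--         return len(text)
--
--     # Try to split at sentence boundary (., !, ?) within 150 chars of max_size
--     for i in range(max_size, max(max_size - 150, 0), -1):
--         if i < len(text) and text[i - 1] in ".!?" and (i >= len(text) or text[i] in " \n"):
--             return i
--
--     # Try to split at word boundary
--     for i in range(max_size, max(max_size - 50, 0), -1):
--         if i < len(text) and text[i] == " ":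
--             return i + 1
--
--     # Hard split at max_size
--     return max_size
-- ===== SOURCE B (Python) =====
-- def _find_split_point(text: str, max_size: int) -> int:
--     """Single forward scan recording the rightmost sentence/word boundary."""
--     n = len(text)
--     if max_size >= n:
--         return n
--     lo1 = max(max_size - 150, 0)
--     lo2 = max(max_size - 50, 0)
--     sent = None
--     word = None
--     for i in range(lo1 + 1, max_size + 1):
--         if text[i - 1] in ".!?" and text[i] in " \n":
--             sent = i
--         if i > lo2 and text[i] == " ":
--             word = i
--     if sent is not None:
--         return sent
--     if word is not None:
--         return word + 1
--     return max_size
-- ===== Notes on version B (the rewrite author's own statement) =====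
-- stated objective: alternative
-- what changed: Replaced A's two backward early-return scans (sentence window, then word window) by a single forward scan that records the rightmost sentence boundary and the rightmost in-window space, choosing among the records afterwards.
import Mathlib
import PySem

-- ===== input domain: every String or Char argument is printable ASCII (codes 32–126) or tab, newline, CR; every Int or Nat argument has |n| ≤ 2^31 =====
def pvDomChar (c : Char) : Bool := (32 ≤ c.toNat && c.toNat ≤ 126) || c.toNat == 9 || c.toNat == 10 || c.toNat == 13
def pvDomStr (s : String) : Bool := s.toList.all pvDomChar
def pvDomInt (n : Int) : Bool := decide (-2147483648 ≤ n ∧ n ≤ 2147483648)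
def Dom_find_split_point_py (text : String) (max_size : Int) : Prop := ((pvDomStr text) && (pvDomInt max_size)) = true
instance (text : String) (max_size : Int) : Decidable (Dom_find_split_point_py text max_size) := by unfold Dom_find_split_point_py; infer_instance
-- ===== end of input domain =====

-- B replaces A's two backward scans by one forward scan that records the rightmost
-- sentence and in-window word boundary (objective: alternative decomposition, same cost).


-- ===== PORT A =====
-- shared primitive for both ports: `text[i] in "chars"`; pyGet? is none exactly where
-- Python raises (never reached: both ports only probe guarded in-range indices)
def pyCharIn (text : String) (i : Int) (cs : List Char) : Bool :=
  match PySem.Str.pyGet? text i with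
  | some c => cs.contains c
  | none => false

def find_split_point_py (text : String) (max_size : Int) : Int :=
  let n : Int := PySem.Str.len text
  if max_size ≥ n then n
  else
    -- for i in range(max_size, max(max_size-150, 0), -1): early return = find?
    match (PySem.List.pyRange max_size (max (max_size - 150) 0) (-1)).find?
        (fun i => decide (i < n) && pyCharIn text (i - 1) ['.', '!', '?'] &&
                  (decide (i ≥ n) || pyCharIn text i [' ', '\n'])) with
    | some i => i
    | none =>
      match (PySem.List.pyRange max_size (max (max_size - 50) 0) (-1)).find?
          (fun i => decide (i < n) && pyCharIn text i [' ']) with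
      | some i => i + 1
      | none => max_size

-- ===== PORT B =====
def find_split_point_py_alt (text : String) (max_size : Int) : Int :=
  let n : Int := PySem.Str.len text
  if max_size ≥ n then n
  else
    let lo1 := max (max_size - 150) 0
    let lo2 := max (max_size - 50) 0
    let r := (PySem.List.pyRange (lo1 + 1) (max_size + 1) 1).foldl
      (fun (acc : Option Int × Option Int) i =>
        (if pyCharIn text (i - 1) ['.', '!', '?'] && pyCharIn text i [' ', '\n'] then some i else acc.1,
         if decide (lo2 < i) && pyCharIn text i [' '] then some i else acc.2))
      (none, none)
    match r.1 with
    | some s => s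
    | none =>
      match r.2 with
      | some w => w + 1
      | none => max_size

-- ===== PRECONDITION & SPEC =====
def Spec_find_split_point_py (text : String) (max_size : Int) (out : Int) : Prop := out = find_split_point_py_alt text max_size
instance (text : String) (max_size : Int) (out : Int) : Decidable (Spec_find_split_point_py text max_size out) := by unfold Spec_find_split_point_py; infer_instance

-- ===== CLAIM (what is proved, stated in full; the proofs are below) =====
def Claim_equal_find_split_point_py : Prop := ∀ (text : String) (max_size : Int), Dom_find_split_point_py text max_size → Spec_find_split_point_py text max_size (find_split_point_py text max_size)

-- ===== LEMMAS AND PROOFS =====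

-- the forward scan's pair of independent "record the match" accumulators splits componentwise
theorem foldl_pair (p q : Int → Bool) (a b : Option Int) (L : List Int) :
    L.foldl (fun acc i =>
        (if p i then some i else acc.1, if q i then some i else acc.2)) (a, b) =
      (L.foldl (fun acc i => if p i then some i else acc) a,
       L.foldl (fun acc i => if q i then some i else acc) b) := by
  induction L generalizing a b with
  | nil => rfl
  | cons x xs ih => simp only [List.foldl_cons, ih]

-- "record the last match" = find? on the reversed list
theorem foldl_lastMatch (p : Int → Bool) (L : List Int) (a : Option Int) :
    L.foldl (fun acc i => if p i then some i else acc) a = (L.reverse.find? p).or a := by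
  induction L generalizing a with
  | nil => rfl
  | cons x xs ih =>
    simp only [List.foldl_cons, ih, List.reverse_cons, List.find?_append]
    cases h : xs.reverse.find? p with
    | some y => rfl
    | none =>
      simp only [Option.none_or, List.find?]
      cases hp : p x <;> simp

theorem find?_congr_mem (p q : Int → Bool) (l : List Int)
    (h : ∀ a ∈ l, p a = q a) : l.find? p = l.find? q := by
  induction l with
  | nil => rfl
  | cons x xs ih =>
    simp only [List.find?]
    rw [h x (List.mem_cons_self)]
    cases q x with
    | true => rfl
    | false => exact ih (fun a ha => h a (List.mem_cons_of_mem _ ha))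

-- ===== VERDICT (by name: the statement is the Claim_ definition above) =====
theorem find_split_point_py_spec : Claim_equal_find_split_point_py := by
  intro text max_size _
  unfold Spec_find_split_point_py find_split_point_py find_split_point_py_alt
  set n : Int := PySem.Str.len text with hn
  by_cases hms : max_size ≥ n
  · simp [hms]
  · simp only [hms, if_false]
    have hlt : max_size < n := lt_of_not_ge hms
    set lo1 : Int := max (max_size - 150) 0 with hlo1
    set lo2 : Int := max (max_size - 50) 0 with hlo2
    rw [foldl_pair]
    rw [foldl_lastMatch, foldl_lastMatch, Option.or_none, Option.or_none]
    rw [← PySem.List.pyRange_neg_one_eq_reverse]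
    -- sentence component: the two predicates agree on every element of the range
    have hsent :
        (PySem.List.pyRange max_size lo1 (-1)).find?
          (fun i => decide (i < n) && pyCharIn text (i - 1) ['.', '!', '?'] &&
                    (decide (i ≥ n) || pyCharIn text i [' ', '\n'])) =
        (PySem.List.pyRange max_size lo1 (-1)).find?
          (fun i => pyCharIn text (i - 1) ['.', '!', '?'] && pyCharIn text i [' ', '\n']) := by
      apply find?_congr_mem
      intro a ha
      rw [PySem.List.mem_pyRange_neg_one] at ha
      have h1 : decide (a < n) = true := by simp; omega
      have h2 : decide (a ≥ n) = false := by simp; omega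
      simp only [h1, h2, Bool.true_and, Bool.false_or]
    rw [hsent]
    -- word component
    have hword :
        (PySem.List.pyRange max_size lo2 (-1)).find?
          (fun i => decide (i < n) && pyCharIn text i [' ']) =
        (PySem.List.pyRange max_size lo1 (-1)).find?
          (fun i => decide (lo2 < i) && pyCharIn text i [' ']) := by
      by_cases hpos : max_size ≤ 0
      · have e1 : PySem.List.pyRange max_size lo2 (-1) = [] :=
          PySem.List.pyRange_neg_one_eq_nil (by omega)
        have e2 : PySem.List.pyRange max_size lo1 (-1) = [] :=
          PySem.List.pyRange_neg_one_eq_nil (by omega)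
        rw [e1, e2]; rfl
      · have hsplit : PySem.List.pyRange (lo1 + 1) (max_size + 1) 1 =
            PySem.List.pyRange (lo1 + 1) (lo2 + 1) 1 ++ PySem.List.pyRange (lo2 + 1) (max_size + 1) 1 :=
          PySem.List.pyRange_one_append _ _ _ (by omega) (by omega)
        rw [PySem.List.pyRange_neg_one_eq_reverse max_size lo1, hsplit, List.reverse_append,
          List.find?_append, ← PySem.List.pyRange_neg_one_eq_reverse,
          ← PySem.List.pyRange_neg_one_eq_reverse]
        have hupper :
            (PySem.List.pyRange max_size lo2 (-1)).find?
              (fun i => decide (lo2 < i) && pyCharIn text i [' ']) =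
            (PySem.List.pyRange max_size lo2 (-1)).find?
              (fun i => decide (i < n) && pyCharIn text i [' ']) := by
          apply find?_congr_mem
          intro a ha
          rw [PySem.List.mem_pyRange_neg_one] at ha
          have h1 : decide (lo2 < a) = true := by simp; omega
          have h2 : decide (a < n) = true := by simp; omega
          simp only [h1, h2, Bool.true_and]
        have hlower :
            (PySem.List.pyRange lo2 lo1 (-1)).find?
              (fun i => decide (lo2 < i) && pyCharIn text i [' ']) = none := by
          rw [List.find?_eq_none]
          intro a ha
          rw [PySem.List.mem_pyRange_neg_one] at ha
          have h1 : decide (lo2 < a) = false := by simp; omega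
          simp [h1]
        rw [hupper, hlower, Option.or_none]
    rw [← hword]
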